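-- pv_equiv track=rewrite | github.com/yetingjian/interface-test | interfaceTest/pyworkspace/SDK/xlinkutils/Xlink_Utils.py | derial_recv_packe_convert
-- ===== SOURCE A (Python) =====
-- def derial_recv_packe_convert(data):
--     index = 1
--     # convert_list = data
--     for i in range(1, len(data)):
--         if data[index] == 0xFD:
--             if data[index - 1] == 0x7F:
--                 data[index - 1] = 0xFF
--                 data.pop(index)
--                 index -= 1
--             elif data[index - 1] == 0x7E:
--                 data[index - 1] = 0xFE
--                 data.pop(index)
--                 index -= 1
--             elif data[index - 1] == 0x7D:
--                 data[index - 1] = 0xFD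
--                 data.pop(index)
--                 index -= 1
--         index += 1
--     return data
-- ===== SOURCE B (Python) =====
-- def derial_recv_packe_convert(data):
--     result = []
--     i = 0
--     n = len(data)
--     while i < n:
--         b = data[i]
--         if b in (0x7F, 0x7E, 0x7D) and i + 1 < n and data[i + 1] == 0xFD:
--             result.append(b + 0x80)
--             i += 2
--         else:
--             result.append(b)
--             i += 1
--     data[:] = result
--     return data
-- ===== Notes on version B (the rewrite author's own statement) =====
-- stated objective: simpler
-- what changed: Replaces A's fixed-iteration cursor loop that mutates the list in place (overwrite previous element, pop current, back up the index) with a single forward two-pointer scan that builds the decoded list directly, consuming two bytes per escape pair and one otherwise, then writes it back with data[:] = result.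
import Mathlib
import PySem

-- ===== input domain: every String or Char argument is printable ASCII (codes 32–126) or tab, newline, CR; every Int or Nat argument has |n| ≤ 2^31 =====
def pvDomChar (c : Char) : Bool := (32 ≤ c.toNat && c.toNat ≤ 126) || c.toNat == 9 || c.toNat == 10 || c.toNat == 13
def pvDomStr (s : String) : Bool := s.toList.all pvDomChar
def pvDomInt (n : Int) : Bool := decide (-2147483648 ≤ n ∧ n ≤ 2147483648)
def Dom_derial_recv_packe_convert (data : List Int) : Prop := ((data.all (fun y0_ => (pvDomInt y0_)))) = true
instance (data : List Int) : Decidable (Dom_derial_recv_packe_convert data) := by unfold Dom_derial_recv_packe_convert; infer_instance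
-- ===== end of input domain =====

-- B replaces A's in-place pop/cursor-backtrack loop with a one-pass two-pointer scan that builds
-- a fresh list (simpler); in Python both end with the argument mutated to the result, and the
-- equivalence proved here is about the RETURN value.

-- ===== PORT A =====
-- A's loop: 'for i in range(1, len(data))' runs a fixed len-1 iterations (the fuel), while the
-- mutable cursor 'index' and the shrinking list evolve.  The 'none' fallbacks are totality
-- guards only: A's Python never raises (the accesses stay in range), so they are never taken.
def pvALoop (fuel : Nat) (data : List Int) (index : Int) : List Int :=
  match fuel with
  | 0 => data
  | Nat.succ f =>
    match PySem.List.pyGet? data index with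
    | none => data
    | some cur =>
      if cur = 253 then
        match PySem.List.pyGet? data (index - 1) with
        | none => data
        | some prev =>
          if prev = 127 then
            match PySem.List.pop? (PySem.List.pySetD data (index - 1) 255) index with
            | none => data
            | some r => pvALoop f r.2 ((index - 1) + 1)
          else if prev = 126 then
            match PySem.List.pop? (PySem.List.pySetD data (index - 1) 254) index with
            | none => data
            | some r => pvALoop f r.2 ((index - 1) + 1)
          else if prev = 125 then
            match PySem.List.pop? (PySem.List.pySetD data (index - 1) 253) index with
            | none => data
            | some r => pvALoop f r.2 ((index - 1) + 1)
          else pvALoop f data (index + 1)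
      else pvALoop f data (index + 1)

def derial_recv_packe_convert (data : List Int) : List Int :=
  pvALoop (data.length - 1) data 1

-- ===== PORT B =====
-- B's forward scan: consume two bytes on an escape pair (0x7F/0x7E/0x7D followed by 0xFD),
-- one byte otherwise.
def pvBLoop : List Int → List Int
  | [] => []
  | [b] => [b]
  | b :: c :: rest =>
    if (b = 127 ∨ b = 126 ∨ b = 125) ∧ c = 253 then (b + 128) :: pvBLoop rest
    else b :: pvBLoop (c :: rest)

def derial_recv_packe_convert_alt (data : List Int) : List Int := pvBLoop data

-- ===== PRECONDITION & SPEC =====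
def Spec_derial_recv_packe_convert (data : List Int) (out : List Int) : Prop := out = derial_recv_packe_convert_alt data
instance (data : List Int) (out : List Int) : Decidable (Spec_derial_recv_packe_convert data out) := by unfold Spec_derial_recv_packe_convert; infer_instance

-- ===== CLAIM (what is proved, stated in full; the proofs are below) =====
def Claim_equal_derial_recv_packe_convert : Prop := ∀ (data : List Int), Dom_derial_recv_packe_convert data → Spec_derial_recv_packe_convert data (derial_recv_packe_convert data)

-- ===== LEMMAS AND PROOFS =====

-- a decoded byte (255/254/253) — or any non-escape byte — passes through B's scan unchanged
lemma pvBLoop_cons_of_not_esc {v : Int} (hv : ¬ (v = 127 ∨ v = 126 ∨ v = 125)) (rest : List Int) :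
    pvBLoop (v :: rest) = v :: pvBLoop rest := by
  cases rest with
  | nil => rfl
  | cons c r => simp [pvBLoop, hv]

-- data.pop(index) at index = done.length + 1
lemma pvPop (done : List Int) (v c : Int) (rest : List Int) :
    PySem.List.pop? (done ++ v :: c :: rest) ((done.length : Int) + 1) = some (c, done ++ v :: rest) := by
  have h : ((done.length : Int) + 1) = ((done.length + 1 : Nat) : Int) := by push_cast; ring
  rw [h, PySem.List.pop?_natCast _ _ (by simp)]
  rw [List.eraseIdx_append_of_length_le (by omega)]
  simp [List.getElem_append_right]

-- data[index - 1] = v at index = done.length + 1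
lemma pvSet (done : List Int) (prev : Int) (xs : List Int) (v : Int) :
    PySem.List.pySetD (done ++ prev :: xs) (((done.length : Int) + 1) - 1) v = done ++ v :: xs := by
  have h : (((done.length : Int) + 1) - 1) = ((done.length : Nat) : Int) := by ring_nf
  rw [h, PySem.List.pySetD_natCast]
  simp

-- data[index] at index = done.length + 1
lemma pvGet1 (done : List Int) (prev c : Int) (rest : List Int) :
    PySem.List.pyGet? (done ++ prev :: c :: rest) ((done.length : Int) + 1) = some c := by
  have h : ((done.length : Int) + 1) = ((done.length + 1 : Nat) : Int) := by push_cast; ring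
  rw [h, PySem.List.pyGet?_natCast]
  simp

-- data[index - 1] at index = done.length + 1
lemma pvGet0 (done : List Int) (prev : Int) (xs : List Int) :
    PySem.List.pyGet? (done ++ prev :: xs) (((done.length : Int) + 1) - 1) = some prev := by
  have h : (((done.length : Int) + 1) - 1) = ((done.length : Nat) : Int) := by ring_nf
  rw [h, PySem.List.pyGet?_natCast]
  simp

-- Loop invariant: with the settled prefix 'done', the cursor on 'prev' (index = done.length + 1
-- examines the pair prev/head of todo) and fuel = todo.length remaining iterations, A's loop
-- finishes exactly as B's scan of prev :: todo appended to the settled prefix.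
lemma pvALoop_key (todo : List Int) : ∀ (done : List Int) (prev : Int),
    pvALoop todo.length (done ++ prev :: todo) ((done.length : Int) + 1) = done ++ pvBLoop (prev :: todo) := by
  induction todo with
  | nil => intro done prev; simp [pvALoop, pvBLoop]
  | cons c rest ih =>
    intro done prev
    have hfall : pvALoop rest.length (done ++ prev :: c :: rest) (((done.length : Int) + 1) + 1)
        = done ++ prev :: pvBLoop (c :: rest) := by
      have h2 : (done ++ [prev]) ++ c :: rest = done ++ prev :: c :: rest := by simp
      have := ih (done ++ [prev]) c
      rw [h2] at this
      simp only [List.length_append, List.length_cons, List.length_nil] at this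
      push_cast at this
      rw [this, List.append_assoc]
      rfl
    rw [show ((c :: rest).length) = rest.length + 1 from rfl]
    by_cases hc : c = 253
    · subst hc
      by_cases h7 : prev = 127
      · subst h7
        simp only [pvALoop, pvGet1, pvGet0, pvSet, pvPop]
        rw [show (((done.length : Int) + 1 - 1) + 1) = (done.length : Int) + 1 by ring]
        rw [ih done 255, pvBLoop_cons_of_not_esc (by norm_num)]
        simp [pvBLoop]
      · by_cases h6 : prev = 126
        · subst h6
          simp only [pvALoop, pvGet1, pvGet0, pvSet, pvPop]
          rw [show (((done.length : Int) + 1 - 1) + 1) = (done.length : Int) + 1 by ring]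
          rw [ih done 254, pvBLoop_cons_of_not_esc (by norm_num)]
          simp [pvBLoop]
        · by_cases h5 : prev = 125
          · subst h5
            simp only [pvALoop, pvGet1, pvGet0, pvSet, pvPop]
            rw [show (((done.length : Int) + 1 - 1) + 1) = (done.length : Int) + 1 by ring]
            rw [ih done 253, pvBLoop_cons_of_not_esc (by norm_num)]
            simp [pvBLoop]
          · simp only [pvALoop, pvGet1, pvGet0, h7, h6, h5, ite_false]
            rw [hfall]
            simp [pvBLoop, h7, h6, h5]
    · simp only [pvALoop, pvGet1, hc, ite_false]
      rw [hfall]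
      have hcond : ¬ ((prev = 127 ∨ prev = 126 ∨ prev = 125) ∧ c = 253) := by tauto
      simp [pvBLoop, hcond]

theorem pv_main (data : List Int) : derial_recv_packe_convert data = derial_recv_packe_convert_alt data := by
  match data with
  | [] => rfl
  | [x] => rfl
  | prev :: c :: rest =>
    have h := pvALoop_key (c :: rest) [] prev
    simp only [List.nil_append, List.length_nil, Nat.cast_zero, zero_add] at h
    exact h

-- ===== VERDICT (by name: the statement is the Claim_ definition above) =====
theorem derial_recv_packe_convert_spec : Claim_equal_derial_recv_packe_convert := by
  intro data _
  exact pv_main data
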